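-- pv_equiv track=rewrite | github.com/chberclaz/MyPT | scripts/sft/build_phase3_dataset.py | _is_grounded
-- ===== SOURCE A (Python) =====
-- from typing import Any, Dict, List, Optional, Tuple
--
-- def _is_grounded(ep: Dict[str, Any]) -> bool:
--     msgs = ep.get("messages", [])
--     for i, m in enumerate(msgs):
--         if not isinstance(m, dict):
--             continue
--         if m.get("role") == "user" and str(m.get("context", "")).strip():
--             for j in range(i + 1, len(msgs)):
--                 n = msgs[j]
--                 if isinstance(n, dict) and n.get("role") == "assistant":
--                     return True
--     return False
-- ===== SOURCE B (Python) =====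
-- def _is_grounded(ep):
--     msgs = ep.get("messages", [])
--     idx = next((i for i, m in enumerate(msgs)
--                 if isinstance(m, dict) and m.get("role") == "user"
--                 and str(m.get("context", "")).strip()), None)
--     if idx is None:
--         return False
--     return any(isinstance(n, dict) and n.get("role") == "assistant"
--                for n in msgs[idx + 1:])
-- ===== Notes on version B (the rewrite author's own statement) =====
-- stated objective: alternative
-- what changed: Replaced A's nested loops (for each grounded user message rescan the tail for an assistant) by two staged passes: locate the FIRST grounded user message, then a single any() over the slice after it; correct because any assistant following some grounded user also follows the first one.
import Mathlib
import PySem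

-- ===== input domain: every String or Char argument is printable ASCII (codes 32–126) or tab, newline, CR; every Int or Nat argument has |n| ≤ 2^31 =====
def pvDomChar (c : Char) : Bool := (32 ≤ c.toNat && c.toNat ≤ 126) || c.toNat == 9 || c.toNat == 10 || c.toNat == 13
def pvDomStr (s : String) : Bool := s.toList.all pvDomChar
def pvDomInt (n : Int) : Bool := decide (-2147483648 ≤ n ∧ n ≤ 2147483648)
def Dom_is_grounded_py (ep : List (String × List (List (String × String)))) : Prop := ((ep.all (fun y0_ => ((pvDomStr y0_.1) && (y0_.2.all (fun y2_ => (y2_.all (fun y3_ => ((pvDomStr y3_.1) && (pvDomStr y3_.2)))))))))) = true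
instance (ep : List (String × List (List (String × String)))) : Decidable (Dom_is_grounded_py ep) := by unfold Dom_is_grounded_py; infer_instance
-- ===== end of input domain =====

-- B replaces A's nested loops by two staged passes: find the first grounded user message, then any() over the slice after it (alternative decomposition; not measured faster).

-- ===== PORT A =====
-- m.get("role") == "user" and str(m.get("context", "")).strip()  (isinstance is always true in the typed domain)
def pvGroundedUser (m : List (String × String)) : Bool :=
  ((PySem.Dict.mk m).get? "role" == some "user") &&
    !(PySem.Str.strip ((PySem.Dict.mk m).getD "context" "") == "")

-- n.get("role") == "assistant"
def pvIsAssistant (m : List (String × String)) : Bool :=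
  (PySem.Dict.mk m).get? "role" == some "assistant"

-- outer 'for i, m in enumerate(msgs)'; the inner 'for j in range(i+1, len(msgs))'
-- walks msgs[i+1:], i.e. the rest of the list, looking for an assistant.
def pvALoop : List (List (String × String)) → Bool
  | [] => false
  | m :: rest =>
      if pvGroundedUser m then
        (if rest.any pvIsAssistant then true else pvALoop rest)
      else pvALoop rest

def is_grounded_py (ep : List (String × List (List (String × String)))) : Bool :=
  pvALoop ((PySem.Dict.mk ep).getD "messages" [])

-- ===== PORT B =====
-- 'idx = next((i for i, m in enumerate(msgs) if <grounded user>), None)' = findIdx?;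
-- then 'any(... for n in msgs[idx+1:])' over the drop-slice.
def is_grounded_py_alt (ep : List (String × List (List (String × String)))) : Bool :=
  let msgs := (PySem.Dict.mk ep).getD "messages" []
  match msgs.findIdx? pvGroundedUser with
  | none => false
  | some i => (msgs.drop (i + 1)).any pvIsAssistant

-- ===== PRECONDITION & SPEC =====
def Spec_is_grounded_py (ep : List (String × List (List (String × String)))) (out : Bool) : Prop := out = is_grounded_py_alt ep
instance (ep : List (String × List (List (String × String)))) (out : Bool) : Decidable (Spec_is_grounded_py ep out) := by unfold Spec_is_grounded_py; infer_instance

-- ===== CLAIM (what is proved, stated in full; the proofs are below) =====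
def Claim_equal_is_grounded_py : Prop := ∀ (ep : List (String × List (List (String × String)))), Dom_is_grounded_py ep → Spec_is_grounded_py ep (is_grounded_py ep)

-- ===== LEMMAS AND PROOFS =====

-- A's nested scan can only return true if an assistant occurs somewhere in the list.
theorem pvALoop_imp_any (l : List (List (String × String))) :
    pvALoop l = true → l.any pvIsAssistant = true := by
  induction l with
  | nil => simp [pvALoop]
  | cons m rest ih =>
      simp only [pvALoop, List.any_cons]
      split_ifs <;> intro h <;> simp_all

-- A's nested scan equals B's find-then-any over the first grounded user.
theorem pvALoop_eq (l : List (List (String × String))) :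
    pvALoop l = (match l.findIdx? pvGroundedUser with
                 | none => false
                 | some i => (l.drop (i + 1)).any pvIsAssistant) := by
  induction l with
  | nil => simp [pvALoop]
  | cons m rest ih =>
      simp only [pvALoop, List.findIdx?_cons]
      by_cases hg : pvGroundedUser m = true
      · simp only [hg, if_true, List.drop_succ_cons, List.drop_zero]
        cases h : rest.any pvIsAssistant with
        | true => simp
        | false =>
            simp only [if_neg Bool.false_ne_true]
            have : pvALoop rest = false := by
              cases ha : pvALoop rest
              · rfl
              · exact absurd (pvALoop_imp_any rest ha) (by simp [h])
            simp [this]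
      · simp only [hg, ih]
        cases hf : rest.findIdx? pvGroundedUser <;>
          simp [List.drop_succ_cons]

-- ===== VERDICT (by name: the statement is the Claim_ definition above) =====
theorem is_grounded_py_spec : Claim_equal_is_grounded_py := by
  intro ep _
  unfold Spec_is_grounded_py is_grounded_py is_grounded_py_alt
  exact pvALoop_eq _
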